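-- pv_equiv track=rewrite | github.com/TimLukaHorstmann/mphil-project-cleaned | FRIDAY/evaluator.py | binary_boundaries_to_masses
-- ===== SOURCE A (Python) =====
-- def binary_boundaries_to_masses(binary_boundaries):
--     '''
--     Convert binary boundary marker sequence to segment lengths (masses)
--     Example: [0, 0, 1, 0, 0, 0, 1, 0] --> [3, 4, 1] for segment lengths.
--     '''
--     segments = []
--     current_segment_length = 0
--     # go through binary boundaries and count segment lengths
--     for marker in binary_boundaries:
--         if marker == 1:
--             if current_segment_length > 0:
--                 segments.append(current_segment_length)
--             current_segment_length = 1
--         else: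
--             current_segment_length += 1
--     if current_segment_length > 0:
--         segments.append(current_segment_length)
--     return segments
-- ===== SOURCE B (Python) =====
-- def binary_boundaries_to_masses(binary_boundaries):
--     seq = list(binary_boundaries)
--     n = len(seq)
--     bounds = [i for i, m in enumerate(seq) if m == 1]
--     if not bounds:
--         return [n] if n > 0 else []
--     res = [bounds[0]] if bounds[0] > 0 else []
--     prev = bounds[0]
--     for b in bounds[1:]:
--         res.append(b - prev)
--         prev = b
--     res.append(n - prev)
--     return res
-- ===== Notes on version B (the rewrite author's own statement) =====
-- stated objective: alternative
-- what changed: B first collects the positions of the boundary markers (== 1) and derives each segment length as a difference of consecutive positions (plus leading/trailing segments), instead of A's single running-counter fold.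
import Mathlib
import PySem

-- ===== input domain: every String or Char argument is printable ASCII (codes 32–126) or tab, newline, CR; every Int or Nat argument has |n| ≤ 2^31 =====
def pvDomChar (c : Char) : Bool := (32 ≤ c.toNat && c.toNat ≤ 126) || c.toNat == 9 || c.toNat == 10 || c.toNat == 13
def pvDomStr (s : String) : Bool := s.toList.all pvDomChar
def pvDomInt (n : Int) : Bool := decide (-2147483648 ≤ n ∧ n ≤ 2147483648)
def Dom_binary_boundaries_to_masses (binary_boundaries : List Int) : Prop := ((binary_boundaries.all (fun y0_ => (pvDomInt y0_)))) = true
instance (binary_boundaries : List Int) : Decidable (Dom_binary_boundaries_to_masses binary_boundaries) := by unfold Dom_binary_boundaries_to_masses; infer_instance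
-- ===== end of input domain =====

-- B derives segment lengths from the boundary positions (differences of consecutive indices of 1s)
-- instead of A's running-counter fold; same values, same O(n) cost (objective: alternative).

-- ===== PORT A =====
def binary_boundaries_to_masses (binary_boundaries : List Int) : List Int :=
  let st := binary_boundaries.foldl
    (fun (st : List Int × Int) marker =>
      if marker == 1 then
        (if st.2 > 0 then st.1 ++ [st.2] else st.1, 1)
      else
        (st.1, st.2 + 1)) ([], 0)
  if st.2 > 0 then st.1 ++ [st.2] else st.1

-- ===== PORT B =====
-- [i for i, m in enumerate(seq) if m == 1], index carried as an Int
def pvBounds (xs : List Int) (i : Int) : List Int :=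
  match xs with
  | [] => []
  | x :: xs => if x == 1 then i :: pvBounds xs (i + 1) else pvBounds xs (i + 1)

-- the 'for b in bounds[1:]' loop plus the final 'res.append(n - prev)'
def pvTailSegs (prev : Int) (bs : List Int) (n : Int) : List Int :=
  match bs with
  | [] => [n - prev]
  | b :: bs => (b - prev) :: pvTailSegs b bs n

def binary_boundaries_to_masses_alt (binary_boundaries : List Int) : List Int :=
  let n : Int := binary_boundaries.length
  match pvBounds binary_boundaries 0 with
  | [] => if n > 0 then [n] else []
  | b0 :: bs => (if b0 > 0 then [b0] else []) ++ pvTailSegs b0 bs n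

-- ===== PRECONDITION & SPEC =====
def Spec_binary_boundaries_to_masses (binary_boundaries : List Int) (out : List Int) : Prop := out = binary_boundaries_to_masses_alt binary_boundaries
instance (binary_boundaries : List Int) (out : List Int) : Decidable (Spec_binary_boundaries_to_masses binary_boundaries out) := by unfold Spec_binary_boundaries_to_masses; infer_instance

-- ===== CLAIM (what is proved, stated in full; the proofs are below) =====
def Claim_equal_binary_boundaries_to_masses : Prop := ∀ (binary_boundaries : List Int), Dom_binary_boundaries_to_masses binary_boundaries → Spec_binary_boundaries_to_masses binary_boundaries (binary_boundaries_to_masses binary_boundaries)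

-- ===== LEMMAS AND PROOFS =====

-- recursive characterisation of A: process xs with running counter c, flush at the end
def pvOut (xs : List Int) (c : Int) : List Int :=
  match xs with
  | [] => if c > 0 then [c] else []
  | x :: xs => if x == 1 then (if c > 0 then c :: pvOut xs 1 else pvOut xs 1) else pvOut xs (c + 1)

theorem pvA_foldl (xs : List Int) : ∀ (segs : List Int) (c : Int),
    (let st := xs.foldl
      (fun (st : List Int × Int) marker =>
        if marker == 1 then
          (if st.2 > 0 then st.1 ++ [st.2] else st.1, 1)
        else
          (st.1, st.2 + 1)) (segs, c)
     if st.2 > 0 then st.1 ++ [st.2] else st.1) = segs ++ pvOut xs c := by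
  induction xs with
  | nil => intro segs c; simp [pvOut]; split <;> simp
  | cons x xs ih =>
    intro segs c
    simp only [List.foldl_cons, pvOut]
    by_cases hx : x == 1
    · simp only [hx, if_true]
      by_cases hc : c > 0
      · simp only [hc, if_true]; rw [ih]; simp
      · simp only [hc, if_false]; rw [ih]
    · simp only [hx, Bool.false_eq_true, if_false]; rw [ih]

theorem pvOut_tail (xs : List Int) : ∀ (prev k : Int), 1 ≤ k →
    pvOut xs k = pvTailSegs prev (pvBounds xs (prev + k)) (prev + k + xs.length) := by
  induction xs with
  | nil => intro prev k hk; simp [pvOut, pvBounds, pvTailSegs]; omega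
  | cons x xs ih =>
    intro prev k hk
    simp only [pvOut, pvBounds]
    by_cases hx : x == 1
    · simp only [hx, if_true]
      have hk' : k > 0 := by omega
      simp only [hk', if_true, pvTailSegs]
      rw [ih (prev + k) 1 (by omega)]
      have h1 : prev + k - prev = k := by omega
      have h2 : prev + k + ((x :: xs).length : Int) = prev + k + 1 + (xs.length : Int) := by
        push_cast [List.length_cons]; ring
      rw [h1, h2]
    · simp only [hx, Bool.false_eq_true, if_false]
      rw [ih prev (k + 1) (by omega)]
      have e1 : prev + (k + 1) = prev + k + 1 := by ring
      have e2 : prev + k + 1 + (xs.length : Int) = prev + k + ((x :: xs).length : Int) := by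
        push_cast [List.length_cons]; ring
      rw [e1, e2]

theorem pvOut_bounds (xs : List Int) : ∀ (c : Int), 0 ≤ c →
    pvOut xs c = (match pvBounds xs c with
      | [] => if c + (xs.length : Int) > 0 then [c + (xs.length : Int)] else []
      | b0 :: bs => (if b0 > 0 then [b0] else []) ++ pvTailSegs b0 bs (c + (xs.length : Int))) := by
  induction xs with
  | nil => intro c _; simp [pvOut, pvBounds]
  | cons x xs ih =>
    intro c hc
    have hlen : c + (((x :: xs).length : Int)) = c + 1 + (xs.length : Int) := by
      push_cast [List.length_cons]; ring
    simp only [pvOut, pvBounds]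
    by_cases hx : x == 1
    · simp only [hx, if_true]
      have htail : pvOut xs 1 = pvTailSegs c (pvBounds xs (c + 1)) (c + (((x :: xs).length : Int))) := by
        rw [pvOut_tail xs c 1 (by omega), hlen]
      by_cases hcpos : c > 0
      · simp only [hcpos, if_true, htail]; rfl
      · simp only [hcpos, if_false, htail]; rfl
    · simp only [hx, Bool.false_eq_true, if_false]
      rw [ih (c + 1) (by omega), hlen]

-- ===== VERDICT (by name: the statement is the Claim_ definition above) =====
theorem binary_boundaries_to_masses_spec : Claim_equal_binary_boundaries_to_masses := by
  intro xs _
  unfold Spec_binary_boundaries_to_masses binary_boundaries_to_masses binary_boundaries_to_masses_alt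
  rw [show (([], (0 : Int)) : List Int × Int) = (([] : List Int), (0 : Int)) from rfl]
  rw [pvA_foldl xs [] 0]
  rw [pvOut_bounds xs 0 (by omega)]
  simp
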